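-- pv_equiv track=rewrite | github.com/StickmanInDC/f1-telemetry-ai | src/ingestion/ergast_client.py | classify_dnf
-- ===== SOURCE A (Python) =====
-- def classify_dnf(status: str) -> str:
--     """
--     Classify a retirement status string into the DNF taxonomy.
--     See doc 03 for full taxonomy definition.
--
--     Returns one of: power_unit, electrical, hydraulics, mechanical, chassis,
--                     collision_fault, collision_racing, collision_other,
--                     precautionary, unknown, finished
--     """
--     s = status.lower().strip()
--
--     # Finished normally
--     if s.startswith('finished') or s.startswith('+') or s.isdigit():
--         return 'finished'
--
--     # Power unit failures
--     pu_keywords = ['engine', 'power unit', 'turbo', 'hybrid', 'fuel',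
--                    'exhaust', 'overheating', 'power loss', 'oil pressure',
--                    'oil leak', 'water pressure', 'water leak', 'mgu-h',
--                    'mgu-k', 'ers', 'internal combustion']
--     if any(kw in s for kw in pu_keywords):
--         return 'power_unit'
--
--     # Electrical failures
--     elec_keywords = ['battery', 'electronic', 'ecu', 'wiring', 'sensor',
--                      'electrical', 'vibration', 'energy store']
--     if any(kw in s for kw in elec_keywords):
--         return 'electrical'
--
--     # Hydraulic failures
--     hyd_keywords = ['hydraulic', 'brake hydraulic']
--     if any(kw in s for kw in hyd_keywords):
--         return 'hydraulics'
--
--     # Mechanical failures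
--     mech_keywords = ['gearbox', 'driveshaft', 'suspension', 'wheel bearing',
--                      'brake failure', 'brakes', 'clutch', 'differential',
--                      'wheel', 'puncture', 'tyre', 'tire']
--     if any(kw in s for kw in mech_keywords):
--         return 'mechanical'
--
--     # Chassis / structural
--     chassis_keywords = ['floor', 'structural', 'bodywork', 'wing',
--                         'front wing', 'rear wing', 'chassis']
--     if any(kw in s for kw in chassis_keywords):
--         return 'chassis'
--
--     # Driver incidents
--     collision_fault_keywords = ['spun off', 'spin', 'driver error', 'off track']
--     if any(kw in s for kw in collision_fault_keywords):
--         return 'collision_fault'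
--
--     collision_racing_keywords = ['collision', 'contact', 'accident', 'crash',
--                                  'racing incident']
--     if any(kw in s for kw in collision_racing_keywords):
--         return 'collision_racing'
--
--     collision_other_keywords = ['debris', 'damage']
--     if any(kw in s for kw in collision_other_keywords):
--         return 'collision_other'
--
--     # Precautionary
--     precautionary_keywords = ['retired', 'withdrew', 'not classified',
--                                'disqualified']
--     if any(kw in s for kw in precautionary_keywords):
--         return 'precautionary'
--
--     return 'unknown'
-- ===== SOURCE B (Python) =====
-- DNF_CATEGORIES = [
--     ('power_unit', ['engine', 'power unit', 'turbo', 'hybrid', 'fuel',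
--                     'exhaust', 'overheating', 'power loss', 'oil pressure',
--                     'oil leak', 'water pressure', 'water leak', 'mgu-h',
--                     'mgu-k', 'ers', 'internal combustion']),
--     ('electrical', ['battery', 'electronic', 'ecu', 'wiring', 'sensor',
--                     'electrical', 'vibration', 'energy store']),
--     ('hydraulics', ['hydraulic', 'brake hydraulic']),
--     ('mechanical', ['gearbox', 'driveshaft', 'suspension', 'wheel bearing',
--                     'brake failure', 'brakes', 'clutch', 'differential',
--                     'wheel', 'puncture', 'tyre', 'tire']),
--     ('chassis', ['floor', 'structural', 'bodywork', 'wing',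
--                  'front wing', 'rear wing', 'chassis']),
--     ('collision_fault', ['spun off', 'spin', 'driver error', 'off track']),
--     ('collision_racing', ['collision', 'contact', 'accident', 'crash',
--                           'racing incident']),
--     ('collision_other', ['debris', 'damage']),
--     ('precautionary', ['retired', 'withdrew', 'not classified',
--                        'disqualified']),
-- ]
--
-- # One flat keyword index: (keyword, rank, label) for every keyword, ranks in
-- # taxonomy priority order.
-- KEYWORD_RANKS = [(kw, rank, label)
--                  for rank, (label, kws) in enumerate(DNF_CATEGORIES)
--                  for kw in kws]
--
--
-- def classify_dnf(status: str) -> str: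
--     s = status.lower().strip()
--     if s.startswith('finished') or s.startswith('+') or s.isdigit():
--         return 'finished'
--     # Single flat pass over all keywords, keeping the lowest-ranked match.
--     best_rank, best_label = len(DNF_CATEGORIES), 'unknown'
--     for kw, rank, label in KEYWORD_RANKS:
--         if rank < best_rank and kw in s:
--             best_rank, best_label = rank, label
--     return best_label
-- ===== Notes on version B (the rewrite author's own statement) =====
-- stated objective: alternative
-- what changed: Replaced the nine sequential per-category any()/return blocks by a flat precomputed (keyword, rank, label) index scanned in one pass with a lowest-rank accumulator; the result is the minimal-rank matching keyword's label instead of the first matching category block.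
import Mathlib
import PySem

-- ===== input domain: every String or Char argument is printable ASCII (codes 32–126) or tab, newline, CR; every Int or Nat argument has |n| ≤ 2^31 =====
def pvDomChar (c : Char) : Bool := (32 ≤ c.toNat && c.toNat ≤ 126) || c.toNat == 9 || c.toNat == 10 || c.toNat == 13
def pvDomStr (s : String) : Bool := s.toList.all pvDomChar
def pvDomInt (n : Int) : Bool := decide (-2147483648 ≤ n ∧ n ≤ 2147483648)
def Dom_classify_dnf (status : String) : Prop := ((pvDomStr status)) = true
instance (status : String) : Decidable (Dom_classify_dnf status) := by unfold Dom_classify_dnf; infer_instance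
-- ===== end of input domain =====

-- B replaces A's nine sequential per-category any()/return blocks by one flat
-- precomputed (keyword, rank, label) index scanned in a single pass with a
-- lowest-rank accumulator (objective: alternative algorithm, same cost).

-- ===== PORT A =====
def classify_dnf (status : String) : String :=
  let s := PySem.Str.strip (PySem.Str.lower status)
  if PySem.Str.startswith s "finished" || PySem.Str.startswith s "+" || PySem.Str.strIsdigit s then
    "finished"
  else
    let pu_keywords := ["engine", "power unit", "turbo", "hybrid", "fuel",
                        "exhaust", "overheating", "power loss", "oil pressure",
                        "oil leak", "water pressure", "water leak", "mgu-h",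
                        "mgu-k", "ers", "internal combustion"]
    if pu_keywords.any (fun kw => PySem.Str.isIn kw s) then "power_unit"
    else
      let elec_keywords := ["battery", "electronic", "ecu", "wiring", "sensor",
                            "electrical", "vibration", "energy store"]
      if elec_keywords.any (fun kw => PySem.Str.isIn kw s) then "electrical"
      else
        let hyd_keywords := ["hydraulic", "brake hydraulic"]
        if hyd_keywords.any (fun kw => PySem.Str.isIn kw s) then "hydraulics"
        else
          let mech_keywords := ["gearbox", "driveshaft", "suspension", "wheel bearing",
                                "brake failure", "brakes", "clutch", "differential",
                                "wheel", "puncture", "tyre", "tire"]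
          if mech_keywords.any (fun kw => PySem.Str.isIn kw s) then "mechanical"
          else
            let chassis_keywords := ["floor", "structural", "bodywork", "wing",
                                     "front wing", "rear wing", "chassis"]
            if chassis_keywords.any (fun kw => PySem.Str.isIn kw s) then "chassis"
            else
              let collision_fault_keywords := ["spun off", "spin", "driver error", "off track"]
              if collision_fault_keywords.any (fun kw => PySem.Str.isIn kw s) then "collision_fault"
              else
                let collision_racing_keywords := ["collision", "contact", "accident", "crash",
                                                  "racing incident"]
                if collision_racing_keywords.any (fun kw => PySem.Str.isIn kw s) then "collision_racing"
                else
                  let collision_other_keywords := ["debris", "damage"]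
                  if collision_other_keywords.any (fun kw => PySem.Str.isIn kw s) then "collision_other"
                  else
                    let precautionary_keywords := ["retired", "withdrew", "not classified",
                                                   "disqualified"]
                    if precautionary_keywords.any (fun kw => PySem.Str.isIn kw s) then "precautionary"
                    else "unknown"

-- ===== PORT B =====
-- B-side helpers: the taxonomy, its flat precomputed keyword index, and the loop body.
def dnfCategories : List (String × List String) :=
  [("power_unit", ["engine", "power unit", "turbo", "hybrid", "fuel",
                   "exhaust", "overheating", "power loss", "oil pressure",
                   "oil leak", "water pressure", "water leak", "mgu-h",
                   "mgu-k", "ers", "internal combustion"]),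
   ("electrical", ["battery", "electronic", "ecu", "wiring", "sensor",
                   "electrical", "vibration", "energy store"]),
   ("hydraulics", ["hydraulic", "brake hydraulic"]),
   ("mechanical", ["gearbox", "driveshaft", "suspension", "wheel bearing",
                   "brake failure", "brakes", "clutch", "differential",
                   "wheel", "puncture", "tyre", "tire"]),
   ("chassis", ["floor", "structural", "bodywork", "wing",
                "front wing", "rear wing", "chassis"]),
   ("collision_fault", ["spun off", "spin", "driver error", "off track"]),
   ("collision_racing", ["collision", "contact", "accident", "crash",
                         "racing incident"]),
   ("collision_other", ["debris", "damage"]),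
   ("precautionary", ["retired", "withdrew", "not classified",
                      "disqualified"])]

-- KEYWORD_RANKS = [(kw, rank, label) for rank, (label, kws) in enumerate(DNF_CATEGORIES) for kw in kws]
def keywordRanks : List (String × Int × String) :=
  (PySem.List.enumerate dnfCategories).flatMap
    (fun rl => rl.2.2.map (fun kw => (kw, rl.1, rl.2.1)))

-- the loop body: keep the lowest-ranked matching keyword
def dnfStep (s : String) (b : Int × String) (x : String × Int × String) : Int × String :=
  if decide (x.2.1 < b.1) && PySem.Str.isIn x.1 s then (x.2.1, x.2.2) else b

def classify_dnf_alt (status : String) : String :=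
  let s := PySem.Str.strip (PySem.Str.lower status)
  if PySem.Str.startswith s "finished" || PySem.Str.startswith s "+" || PySem.Str.strIsdigit s then
    "finished"
  else
    (keywordRanks.foldl (dnfStep s) ((dnfCategories.length : Int), "unknown")).2

-- ===== PRECONDITION & SPEC =====
def Spec_classify_dnf (status : String) (out : String) : Prop := out = classify_dnf_alt status
instance (status : String) (out : String) : Decidable (Spec_classify_dnf status out) := by unfold Spec_classify_dnf; infer_instance

-- ===== CLAIM (what is proved, stated in full; the proofs are below) =====
def Claim_equal_classify_dnf : Prop := ∀ (status : String), Dom_classify_dnf status → Spec_classify_dnf status (classify_dnf status)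

-- ===== LEMMAS AND PROOFS =====

-- the flat index of a category list with ranks starting at i
def flatIdx (i : Int) : List (String × List String) → List (String × Int × String)
  | [] => []
  | (label, kws) :: rest => kws.map (fun kw => (kw, i, label)) ++ flatIdx (i + 1) rest

-- first-match semantics: the value B's fold computes
def catFirst (s : String) (b : Int × String) : Int → List (String × List String) → Int × String
  | _, [] => b
  | i, (label, kws) :: rest =>
      if kws.any (fun kw => PySem.Str.isIn kw s) then (i, label)
      else catFirst s b (i + 1) rest

lemma keywordRanks_eq : keywordRanks = flatIdx 0 dnfCategories := by
  decide

lemma block_stay (s : String) (kws : List String) (r : Int) (label : String)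
    (b : Int × String) (h : b.1 ≤ r) :
    kws.foldl (fun acc kw => dnfStep s acc (kw, r, label)) b = b := by
  induction kws with
  | nil => rfl
  | cons kw rest ih =>
      rw [List.foldl_cons]
      have hstep : dnfStep s b (kw, r, label) = b := by
        simp [dnfStep, not_lt.mpr h]
      rw [hstep]; exact ih

lemma foldl_map_block (s : String) (kws : List String) (r : Int) (label : String)
    (b : Int × String) :
    (kws.map (fun kw => (kw, r, label))).foldl (dnfStep s) b
      = kws.foldl (fun acc kw => dnfStep s acc (kw, r, label)) b := by
  rw [List.foldl_map]

lemma block_match (s : String) (kws : List String) (r : Int) (label : String)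
    (b : Int × String) (h : r < b.1) :
    kws.foldl (fun acc kw => dnfStep s acc (kw, r, label)) b
      = if kws.any (fun kw => PySem.Str.isIn kw s) then (r, label) else b := by
  induction kws generalizing b with
  | nil => simp
  | cons kw rest ih =>
      rw [List.foldl_cons]
      by_cases hkw : PySem.Chars.isIn kw.toList s.toList = true
      · have hstep : dnfStep s b (kw, r, label) = (r, label) := by
          simp [dnfStep, h, hkw]
        rw [hstep, block_stay s rest r label (r, label) le_rfl]
        simp [hkw]
      · have hkw' := Bool.not_eq_true _ |>.mp hkw
        have hstep : dnfStep s b (kw, r, label) = b := by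
          simp [dnfStep, hkw']
        rw [hstep, ih b h]
        simp [hkw']

lemma suffix_stay (s : String) (cats : List (String × List String)) (i : Int)
    (b : Int × String) (h : b.1 ≤ i) :
    (flatIdx i cats).foldl (dnfStep s) b = b := by
  induction cats generalizing i with
  | nil => rfl
  | cons c rest ih =>
      obtain ⟨label, kws⟩ := c
      rw [flatIdx, List.foldl_append, foldl_map_block, block_stay s kws i label b h]
      exact ih (i + 1) (le_trans h (by omega))

lemma fold_flatIdx (s : String) (cats : List (String × List String)) (i : Int)
    (b : Int × String) (h : i + cats.length ≤ b.1) :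
    (flatIdx i cats).foldl (dnfStep s) b = catFirst s b i cats := by
  induction cats generalizing i with
  | nil => rfl
  | cons c rest ih =>
      obtain ⟨label, kws⟩ := c
      have hlen : (List.length (⟨label, kws⟩ :: rest) : Int) = rest.length + 1 := by
        simp
      have hi : i < b.1 := by
        have := h; rw [hlen] at this; omega
      rw [flatIdx, List.foldl_append, foldl_map_block, block_match s kws i label b hi,
        catFirst]
      by_cases hm : kws.any (fun kw => PySem.Str.isIn kw s) = true
      · rw [if_pos hm, if_pos hm]
        exact suffix_stay s rest (i + 1) (i, label) (by omega)
      · rw [if_neg hm, if_neg hm]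
        exact ih (i + 1) (by rw [hlen] at h; omega)

-- ===== VERDICT (by name: the statement is the Claim_ definition above) =====
theorem classify_dnf_spec : Claim_equal_classify_dnf := by
  intro status _
  unfold Spec_classify_dnf classify_dnf classify_dnf_alt
  set s := PySem.Str.strip (PySem.Str.lower status) with hs
  by_cases hf : (PySem.Str.startswith s "finished" || PySem.Str.startswith s "+"
      || PySem.Str.strIsdigit s) = true
  · simp only [hf, if_true]
  · simp only [Bool.not_eq_true] at hf
    simp only [hf, Bool.false_eq_true, if_false]
    rw [keywordRanks_eq,
      fold_flatIdx s dnfCategories 0 ((dnfCategories.length : Int), "unknown") (by decide)]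
    simp only [dnfCategories, catFirst]
    simp only [apply_ite (Prod.snd)]
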